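-- pv_equiv track=rewrite | github.com/pypi-data/pypi-mirror-403 | packages/amirpc/amirpc-1.4.0-py3-none-any.whl/amirpc/context/user.py | _match_permission_pattern
-- ===== SOURCE A (Python) =====
-- def _match_permission_pattern(permission: str, pattern: str) -> bool:
--     """Check if permission matches pattern with wildcard support.
--
--     Args:
--         permission: Permission to check (e.g., "orchestrator:workers:view")
--         pattern: Pattern to match against (e.g., "orchestrator:*")
--
--     Returns:
--         True if permission matches pattern
--     """
--     if pattern == "*":
--         return True
--
--     if "*" not in pattern:
--         return permission == pattern
--
--     # Split by colon and match parts
--     perm_parts = permission.split(":")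
--     pattern_parts = pattern.split(":")
--
--     if len(pattern_parts) > len(perm_parts):
--         return False
--
--     for perm_part, pattern_part in zip(perm_parts, pattern_parts, strict=False):
--         if pattern_part == "*":
--             return True
--         if perm_part != pattern_part:
--             return False
--
--     return len(pattern_parts) == len(perm_parts)
-- ===== SOURCE B (Python) =====
-- def _match_permission_pattern(permission: str, pattern: str) -> bool:
--     """Wildcard match, decomposed as: locate the first '*' segment, then one
--     prefix comparison of the split parts (instead of a fused scan-and-return loop)."""
--     if pattern == "*":
--         return True
--     if "*" not in pattern:
--         return permission == pattern
--
--     perm_parts = permission.split(":")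
--     pattern_parts = pattern.split(":")
--
--     if len(pattern_parts) > len(perm_parts):
--         return False
--
--     try:
--         j = pattern_parts.index("*")
--         return perm_parts[:j] == pattern_parts[:j]
--     except ValueError:
--         return perm_parts == pattern_parts
-- ===== Notes on version B (the rewrite author's own statement) =====
-- stated objective: alternative
-- what changed: Replaced the fused zip loop that scans and returns inside the loop body with a two-step decomposition: find the index of the first '*' segment with list.index, then decide by a single prefix (or whole-list) equality comparison of the split parts.
import Mathlib
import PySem

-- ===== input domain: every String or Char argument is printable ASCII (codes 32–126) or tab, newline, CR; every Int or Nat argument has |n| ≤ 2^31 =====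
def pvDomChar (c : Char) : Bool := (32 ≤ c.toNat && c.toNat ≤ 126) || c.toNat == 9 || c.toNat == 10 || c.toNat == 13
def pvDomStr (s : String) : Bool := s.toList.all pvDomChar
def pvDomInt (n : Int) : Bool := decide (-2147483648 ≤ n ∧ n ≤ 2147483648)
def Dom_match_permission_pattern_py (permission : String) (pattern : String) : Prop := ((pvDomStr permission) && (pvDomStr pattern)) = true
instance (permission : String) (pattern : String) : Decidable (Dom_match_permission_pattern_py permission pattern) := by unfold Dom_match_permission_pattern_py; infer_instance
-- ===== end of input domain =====

-- B locates the first '*' segment and decides by one prefix comparison, instead of A's fused scan-and-return zip loop (alternative decomposition, same cost).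

-- ===== PORT A =====
-- the 'for perm_part, pattern_part in zip(...)' loop: some b = early return, none = fall-through
def matchPartsLoop : List String → List String → Option Bool
  | permPart :: perms, patPart :: pats =>
      if patPart == "*" then some true
      else if permPart != patPart then some false
      else matchPartsLoop perms pats
  | _, _ => none

def match_permission_pattern_py (permission : String) (pattern : String) : Bool :=
  if pattern == "*" then true
  else if !(PySem.Str.isIn "*" pattern) then permission == pattern
  else
    let permParts := (PySem.Str.split? permission ":").getD []
    let patternParts := (PySem.Str.split? pattern ":").getD []
    if patternParts.length > permParts.length then false
    else (matchPartsLoop permParts patternParts).getD (patternParts.length == permParts.length)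

-- ===== PORT B =====
def match_permission_pattern_py_alt (permission : String) (pattern : String) : Bool :=
  if pattern == "*" then true
  else if !(PySem.Str.isIn "*" pattern) then permission == pattern
  else
    let permParts := (PySem.Str.split? permission ":").getD []
    let patternParts := (PySem.Str.split? pattern ":").getD []
    if patternParts.length > permParts.length then false
    else
      match PySem.List.index? patternParts "*" with
      | some j =>
          PySem.List.slice permParts none (some (j : Int))
            == PySem.List.slice patternParts none (some (j : Int))
      | none => permParts == patternParts

-- ===== PRECONDITION & SPEC =====
def Spec_match_permission_pattern_py (permission : String) (pattern : String) (out : Bool) : Prop := out = match_permission_pattern_py_alt permission pattern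
instance (permission : String) (pattern : String) (out : Bool) : Decidable (Spec_match_permission_pattern_py permission pattern out) := by unfold Spec_match_permission_pattern_py; infer_instance

-- ===== CLAIM (what is proved, stated in full; the proofs are below) =====
def Claim_equal_match_permission_pattern_py : Prop := ∀ (permission : String) (pattern : String), Dom_match_permission_pattern_py permission pattern → Spec_match_permission_pattern_py permission pattern (match_permission_pattern_py permission pattern)

-- ===== LEMMAS AND PROOFS =====
-- core: on part lists with |pats| ≤ |perms|, A's loop+fallthrough equals B's find-then-prefix-compare
theorem matchLoop_eq_find (pats : List String) : ∀ (perms : List String),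
    pats.length ≤ perms.length →
    (matchPartsLoop perms pats).getD (pats.length == perms.length) =
      (match PySem.List.index? pats "*" with
       | some j => PySem.List.slice perms none (some (j : Int))
                     == PySem.List.slice pats none (some (j : Int))
       | none => perms == pats) := by
  induction pats with
  | nil =>
      intro perms _
      cases perms with
      | nil => simp [matchPartsLoop, PySem.List.index?]
      | cons p ps => simp [matchPartsLoop, PySem.List.index?]
  | cons q qs ih =>
      intro perms hlen
      cases perms with
      | nil => simp at hlen
      | cons p ps =>
        by_cases hq : q = "*"
        · subst hq
          rw [PySem.List.index?_cons_self]
          simp [matchPartsLoop, PySem.List.slice]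
        · rw [PySem.List.index?_cons_of_ne qs hq]
          have hq' : (q == "*") = false := by simp [hq]
          have hgd : (((q :: qs).length : Nat) == (p :: ps).length)
              = (qs.length == ps.length) := by simp
          cases hidx : PySem.List.index? qs "*" with
          | none =>
              have hrec : (matchPartsLoop ps qs).getD (qs.length == ps.length)
                  = (ps == qs) := by
                have h := ih ps (by simpa using hlen); rw [hidx] at h; simpa using h
              by_cases hpq : p = q
              · subst hpq
                simp [matchPartsLoop, hq', hrec]
              · simp [matchPartsLoop, hq', hpq]
          | some j =>
              have hrec : (matchPartsLoop ps qs).getD (qs.length == ps.length)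
                  = (ps.take j == qs.take j) := by
                have h := ih ps (by simpa using hlen); rw [hidx] at h
                simpa [PySem.List.slice_to_natCast] using h
              simp only [Option.map_some]
              rw [PySem.List.slice_to_natCast, PySem.List.slice_to_natCast]
              by_cases hpq : p = q
              · subst hpq
                simp [matchPartsLoop, hq', hrec, List.take_succ_cons]
              · simp [matchPartsLoop, hq', hpq, List.take_succ_cons]

-- ===== VERDICT (by name: the statement is the Claim_ definition above) =====
theorem match_permission_pattern_py_spec : Claim_equal_match_permission_pattern_py := by
  intro permission pattern _
  unfold Spec_match_permission_pattern_py match_permission_pattern_py match_permission_pattern_py_alt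
  dsimp only
  by_cases h1 : (pattern == "*") = true
  · rw [if_pos h1, if_pos h1]
  · rw [if_neg h1, if_neg h1]
    by_cases h2 : (!PySem.Str.isIn "*" pattern) = true
    · rw [if_pos h2, if_pos h2]
    · rw [if_neg h2, if_neg h2]
      by_cases h3 : ((PySem.Str.split? pattern ":").getD []).length > ((PySem.Str.split? permission ":").getD []).length
      · rw [if_pos h3, if_pos h3]
      · rw [if_neg h3, if_neg h3]
        exact matchLoop_eq_find _ _ (by omega)
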